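-- pv_equiv track=rewrite | github.com/guraltsev/gu_toolkit | src/gu_toolkit/mathlive_transport.py | _contains_ambiguous_single_underscore
-- ===== SOURCE A (Python) =====
-- def _contains_ambiguous_single_underscore(text: str) -> bool:
--     index = 0
--     while index < len(text):
--         if text[index] != "_":
--             index += 1
--             continue
--         if index + 1 < len(text) and text[index + 1] == "_":
--             index += 2
--             continue
--         return True
--     return False
-- ===== SOURCE B (Python) =====
-- def _contains_ambiguous_single_underscore(text: str) -> bool:
--     run = 0
--     for ch in text:
--         if ch == "_":
--             run += 1
--         else:
--             if run % 2 == 1: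
--                 return True
--             run = 0
--     return run % 2 == 1
-- ===== Notes on version B (the rewrite author's own statement) =====
-- stated objective: simpler
-- what changed: Replaced the index pointer that greedily skips underscore pairs with a single for-loop maintaining the length of the current underscore run and testing its parity when the run ends.
import Mathlib
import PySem

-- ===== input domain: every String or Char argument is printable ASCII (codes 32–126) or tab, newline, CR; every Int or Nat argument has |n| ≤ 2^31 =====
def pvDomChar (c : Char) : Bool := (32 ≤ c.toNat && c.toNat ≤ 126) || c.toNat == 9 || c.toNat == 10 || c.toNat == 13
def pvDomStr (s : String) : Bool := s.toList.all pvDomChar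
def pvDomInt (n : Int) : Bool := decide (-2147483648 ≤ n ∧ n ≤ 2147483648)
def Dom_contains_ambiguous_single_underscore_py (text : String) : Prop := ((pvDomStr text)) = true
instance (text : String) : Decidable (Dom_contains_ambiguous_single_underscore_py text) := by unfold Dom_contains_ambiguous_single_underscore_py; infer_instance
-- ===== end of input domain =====

-- B replaces A's pair-skipping index pointer with a run-length parity counter (objective: simpler).


-- ===== PORT A =====
-- A's while loop over index: at '_' it looks at the next char; a doubled '_' skips two,
-- otherwise return True. Ported as structural recursion on the character list (advancing
-- the index = dropping consumed characters).
def pvLoopA : List Char → Bool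
  | [] => false
  | c :: rest =>
    if c ≠ '_' then pvLoopA rest
    else
      match rest with
      | d :: rest2 => if d == '_' then pvLoopA rest2 else true
      | [] => true

def contains_ambiguous_single_underscore_py (text : String) : Bool :=
  pvLoopA text.toList

-- ===== PORT B =====
-- B's for-loop with the `run` counter; the final `return run % 2 == 1` is the base case.
def pvLoopB : List Char → Nat → Bool
  | [], run => run % 2 == 1
  | c :: rest, run =>
    if c == '_' then pvLoopB rest (run + 1)
    else if run % 2 == 1 then true else pvLoopB rest 0

def contains_ambiguous_single_underscore_py_alt (text : String) : Bool :=
  pvLoopB text.toList 0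

-- ===== PRECONDITION & SPEC =====
def Spec_contains_ambiguous_single_underscore_py (text : String) (out : Bool) : Prop := out = contains_ambiguous_single_underscore_py_alt text
instance (text : String) (out : Bool) : Decidable (Spec_contains_ambiguous_single_underscore_py text out) := by unfold Spec_contains_ambiguous_single_underscore_py; infer_instance

-- ===== CLAIM (what is proved, stated in full; the proofs are below) =====
def Claim_equal_contains_ambiguous_single_underscore_py : Prop := ∀ (text : String), Dom_contains_ambiguous_single_underscore_py text → Spec_contains_ambiguous_single_underscore_py text (contains_ambiguous_single_underscore_py text)

-- ===== LEMMAS AND PROOFS =====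

-- A on a block of n underscores followed by a list not starting with '_':
-- pairs are skipped, so the result is True iff n is odd, else A continues on l.
theorem pvLoopA_replicate (n : ℕ) (l : List Char) (h : l.head? ≠ some '_') :
    pvLoopA (List.replicate n '_' ++ l) = if n % 2 == 1 then true else pvLoopA l := by
  induction n using Nat.twoStepInduction with
  | zero => simp
  | one =>
    cases l with
    | nil => simp [pvLoopA]
    | cons d t =>
      have hd : d ≠ '_' := by simpa using h
      simp [pvLoopA, hd]
  | more n ih _ =>
    have : pvLoopA (List.replicate (n + 2) '_' ++ l) = pvLoopA (List.replicate n '_' ++ l) := by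
      simp [List.replicate_succ, pvLoopA]
    rw [this, ih, Nat.add_mod_right]

-- The invariant linking B's counter to A: B with counter `run` on the rest `l`
-- computes what A computes on `run` underscores prepended to `l`.
theorem pvLoopB_eq_pvLoopA (l : List Char) : ∀ run : ℕ,
    pvLoopB l run = pvLoopA (List.replicate run '_' ++ l) := by
  induction l with
  | nil =>
    intro run
    rw [pvLoopA_replicate run [] (by simp)]
    simp only [pvLoopB, pvLoopA]
    rcases h : (run % 2 == 1) with _ | _ <;> simp_all
  | cons c t ih =>
    intro run
    by_cases hc : c = '_'
    · subst hc
      simp only [pvLoopB, if_pos (by simp : ('_' == '_') = true)]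
      rw [ih (run + 1)]
      congr 1
      simp [List.replicate_succ']
    · have hcb : (c == '_') = false := by simpa using hc
      rw [pvLoopA_replicate run (c :: t) (by simpa using hc)]
      by_cases h : run % 2 = 1
      · simp [pvLoopB, hcb, h]
      · have ht : pvLoopA (c :: t) = pvLoopA t := by rw [pvLoopA.eq_def]; simp [hc]
        have h0 := ih 0
        simp only [List.replicate, List.nil_append] at h0
        simp [pvLoopB, hcb, h, ht, h0]

-- ===== VERDICT (by name: the statement is the Claim_ definition above) =====
theorem contains_ambiguous_single_underscore_py_spec : Claim_equal_contains_ambiguous_single_underscore_py := by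
  intro text _
  unfold Spec_contains_ambiguous_single_underscore_py
  unfold contains_ambiguous_single_underscore_py contains_ambiguous_single_underscore_py_alt
  rw [pvLoopB_eq_pvLoopA text.toList 0]
  simp
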